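-- pv_equiv track=rewrite | github.com/milad-najafgholi-salimi/My_Notes | DSA/Notes_and_Tips/Hash_Table_Notes_and_Details.py | hash_sort
-- ===== SOURCE A (Python) =====
-- def hash_sort(arr):
--     n = len(arr)
--     hash_table = []
--     for i in range(n):
--         hash_table.append([])
--
--     for value in arr:
--         index = value % n
--         hash_table[index].append(value)
--
--     # After above code, hash_table could be like this for example: hash_table = [[], [7, 17], [], [3], [], [22, 12]]
--     result = []
--     for bucket in hash_table:
--         for value in sorted(bucket): # 'sorted()' is a built-in function. The sorted() function returns a sorted list of the specified iterable object.
--             result.append(value)        # which means it iterate on every hash_table element and sort them into its new sorted list. So it's gathering all sorted buckets into a sorted list.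
--             # We take each value from sorted bucket and put it into the final list.
--     return result
-- ===== SOURCE B (Python) =====
-- def hash_sort(arr):
--     n = len(arr)
--     return sorted(arr, key=lambda v: (v % n, v))
-- ===== Notes on version B (the rewrite author's own statement) =====
-- stated objective: idiomatic
-- what changed: Replaces the explicit bucket table (build n empty buckets, append by v % n, sort each bucket, concatenate) with a single stable sort on the composite key (v % n, v), which reproduces the bucket order and each bucket's internal order.
import Mathlib
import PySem

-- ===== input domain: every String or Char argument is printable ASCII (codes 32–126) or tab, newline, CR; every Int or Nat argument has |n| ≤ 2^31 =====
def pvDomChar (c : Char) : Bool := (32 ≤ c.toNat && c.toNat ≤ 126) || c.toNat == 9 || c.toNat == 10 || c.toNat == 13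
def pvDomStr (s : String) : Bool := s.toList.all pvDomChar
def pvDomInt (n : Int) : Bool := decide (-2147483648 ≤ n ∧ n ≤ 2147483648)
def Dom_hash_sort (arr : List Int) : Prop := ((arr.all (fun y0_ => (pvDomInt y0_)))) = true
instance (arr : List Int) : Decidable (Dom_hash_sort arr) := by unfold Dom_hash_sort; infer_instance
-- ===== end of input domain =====

-- B replaces A's explicit bucket table (n empty buckets, append by v % n, sort each bucket,
-- concatenate) with one stable sort on the composite key (v % n, v): idiomatic, same cost.


-- ===== PORT A =====
-- 'hash_table[index].append(value)': index = value % n satisfies 0 ≤ index < n whenever the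
-- loop body runs (then n = len(arr) ≥ 1 and Python's % takes the divisor's sign), so '.toNat'
-- is exact here.
def hash_sort (arr : List Int) : List Int :=
  let n : Int := PySem.List.len arr
  let hash_table : List (List Int) :=
    (PySem.List.pyRange 0 n 1).foldl (fun ht _i => ht ++ [([] : List Int)]) []
  let hash_table :=
    arr.foldl (fun ht value =>
      ht.modify (PySem.Int.mod value n).toNat (fun b => b ++ [value])) hash_table
  hash_table.foldl (fun result bucket =>
    (PySem.List.sorted bucket (fun v => v) false).foldl
      (fun result value => result ++ [value]) result) []

-- ===== PORT B =====
def hash_sort_alt (arr : List Int) : List Int :=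
  let n : Int := PySem.List.len arr
  PySem.List.sorted2 arr (fun v => PySem.Int.mod v n) (fun v => v) false

-- ===== PRECONDITION & SPEC =====
def Spec_hash_sort (arr : List Int) (out : List Int) : Prop := out = hash_sort_alt arr
instance (arr : List Int) (out : List Int) : Decidable (Spec_hash_sort arr out) := by unfold Spec_hash_sort; infer_instance

-- ===== CLAIM (what is proved, stated in full; the proofs are below) =====
def Claim_equal_hash_sort : Prop := ∀ (arr : List Int), Dom_hash_sort arr → Spec_hash_sort arr (hash_sort arr)

-- ===== LEMMAS AND PROOFS =====

-- the composite key (v % n, v), ordered lexicographically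
def pvKey (n v : Int) : Lex (Int × Int) := toLex (PySem.Int.mod v n, v)

lemma pvKey_inj (n : Int) : Function.Injective (pvKey n) := by
  intro a b h
  simp only [pvKey, toLex_inj, Prod.mk.injEq] at h
  exact h.2

-- sorted2 with Int keys is sorted with the lexicographic pair key
lemma sorted2_eq_sorted_lex (xs : List Int) (k1 k2 : Int → Int) :
    PySem.List.sorted2 xs k1 k2 false
      = PySem.List.sorted xs (fun v => toLex (k1 v, k2 v)) false := by
  simp only [PySem.List.sorted2, PySem.List.sorted, if_neg (by decide : ¬ (false = true))]
  have hb : (fun a b : Int =>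
        decide (k1 a < k1 b) || (!decide (k1 b < k1 a) && decide (k2 a < k2 b)))
      = (fun a b : Int =>
        decide ((toLex (k1 a, k2 a) : Lex (Int × Int)) < toLex (k1 b, k2 b))) := by
    funext a b
    rw [show (decide (k1 a < k1 b) || (!decide (k1 b < k1 a) && decide (k2 a < k2 b)))
          = decide ((k1 a < k1 b) ∨ (¬ (k1 b < k1 a) ∧ k2 a < k2 b)) by
          by_cases h : k1 a < k1 b <;> by_cases h2 : k1 b < k1 a <;> simp [h, h2],
        decide_eq_decide, Prod.Lex.toLex_lt_toLex]
    constructor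
    · rintro (h | ⟨h1, h2⟩)
      · exact Or.inl h
      · by_cases hlt : k1 a < k1 b
        · exact Or.inl hlt
        · exact Or.inr ⟨by omega, h2⟩
    · rintro (h | ⟨h1, h2⟩)
      · exact Or.inl h
      · exact Or.inr ⟨by omega, h2⟩
  rw [hb]

lemma alt_eq (arr : List Int) :
    hash_sort_alt arr = PySem.List.sorted arr (pvKey (arr.length : Int)) false := by
  unfold hash_sort_alt
  simp only [PySem.List.len_eq]
  exact sorted2_eq_sorted_lex arr _ _

-- the bucket table A builds: bucket i holds the values with v % n == i, in input order
def pvBuckets (arr : List Int) : List (List Int) :=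
  (List.range arr.length).map
    (fun i => arr.filter (fun v => (PySem.Int.mod v (arr.length : Int)).toNat == i))

-- the filling loop, over any table long enough
lemma fill_spec (n : Int) (l : List Int) (t : List (List Int))
    (h : ∀ v ∈ l, (PySem.Int.mod v n).toNat < t.length) :
    l.foldl (fun ht value =>
        ht.modify (PySem.Int.mod value n).toNat (fun b => b ++ [value])) t
      = (List.range t.length).map
          (fun i => t.getD i [] ++ l.filter (fun v => (PySem.Int.mod v n).toNat == i)) := by
  induction l generalizing t with
  | nil =>
    simp only [List.foldl_nil, List.filter_nil, List.append_nil]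
    refine (List.ext_getElem (by simp) ?_).symm
    intro i h1 h2
    simp [List.getD, List.getElem?_eq_getElem h2]
  | cons x l ih =>
    rw [List.foldl_cons, ih _ (by
      intro v hv
      rw [List.length_modify]
      exact h v (List.mem_cons_of_mem _ hv))]
    rw [List.length_modify]
    refine List.map_congr_left ?_
    intro i hi
    rw [List.mem_range] at hi
    have hmod : (t.modify (PySem.Int.mod x n).toNat (fun b => b ++ [x])).getD i []
        = if (PySem.Int.mod x n).toNat = i then t.getD i [] ++ [x] else t.getD i [] := by
      rw [List.getD_eq_getElem _ [] (by rw [List.length_modify]; exact hi),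
          List.getElem_modify, List.getD_eq_getElem t [] hi]
    rw [hmod, List.filter_cons]
    by_cases hk : (PySem.Int.mod x n).toNat = i
    · simp [hk]
    · simp [hk]

lemma hash_sort_eq (arr : List Int) :
    hash_sort arr
      = ((pvBuckets arr).map (fun b => PySem.List.sorted b (fun v => v) false)).flatten := by
  unfold hash_sort
  simp only [PySem.List.len_eq]
  rw [PySem.List.foldl_append_singleton_eq_map (f := fun _ : Int => ([] : List Int)),
      List.nil_append, List.map_const']
  have hlen : (PySem.List.pyRange 0 (arr.length : Int) 1).length = arr.length := by
    rw [PySem.List.length_pyRange_one]; omega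
  rw [hlen]
  rw [fill_spec (arr.length : Int) arr _ (by
    intro v hv
    rw [List.length_replicate]
    have hn : (0 : Int) < (arr.length : Int) := by
      have := List.length_pos_of_mem hv; omega
    have h1 := PySem.Int.mod_nonneg v hn
    have h2 := PySem.Int.mod_lt v hn
    omega)]
  rw [List.length_replicate]
  have hconst : (List.range arr.length).map
        (fun i => (List.replicate arr.length ([] : List Int)).getD i []
          ++ arr.filter (fun v => (PySem.Int.mod v (arr.length : Int)).toNat == i))
      = pvBuckets arr := by
    refine List.map_congr_left ?_
    intro i hi
    rw [List.mem_range] at hi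
    rw [List.getD_eq_getElem _ [] (by simpa using hi), List.getElem_replicate,
        List.nil_append]
  rw [hconst]
  have hinner : (fun (result : List Int) (bucket : List Int) =>
        (PySem.List.sorted bucket (fun v => v) false).foldl
          (fun result value => result ++ [value]) result)
      = (fun result bucket => result ++ PySem.List.sorted bucket (fun v => v) false) := by
    funext result bucket
    exact PySem.List.foldl_append_singleton_eq_self _ _
  rw [hinner,
      PySem.List.foldl_append_eq_flatMap (fun b => PySem.List.sorted b (fun v => v) false),
      List.nil_append, List.flatMap_def]

-- membership in bucket i pins the remainder
lemma mem_bucket (arr : List Int) (i : Nat) (x : Int)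
    (hx : x ∈ arr.filter (fun v => (PySem.Int.mod v (arr.length : Int)).toNat == i)) :
    x ∈ arr ∧ PySem.Int.mod x (arr.length : Int) = (i : Int) := by
  rw [List.mem_filter] at hx
  obtain ⟨hmem, heq⟩ := hx
  have hn : (0 : Int) < (arr.length : Int) := by
    have := List.length_pos_of_mem hmem; omega
  have h1 := PySem.Int.mod_nonneg x hn
  have h2 : (PySem.Int.mod x (arr.length : Int)).toNat = i := by simpa using heq
  exact ⟨hmem, by omega⟩

lemma sum_map_range_single (n k c : Nat) :
    ((List.range n).map (fun i => if k = i then c else 0)).sum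
      = if k < n then c else 0 := by
  induction n with
  | zero => simp
  | succ n ih =>
    rw [List.range_succ, List.map_append, List.sum_append, ih]
    simp only [List.map_cons, List.map_nil, List.sum_cons, List.sum_nil]
    by_cases h1 : k < n <;> by_cases h2 : k = n <;> simp [h1, h2] <;> omega

lemma perm_lemma (arr : List Int) :
    ((pvBuckets arr).map (fun b => PySem.List.sorted b (fun v => v) false)).flatten.Perm arr := by
  rw [List.perm_iff_count]
  intro a
  rw [List.count_flatten]
  unfold pvBuckets
  rw [List.map_map, List.map_map]
  have hstep : ∀ i : Nat,
      List.count a (PySem.List.sorted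
          (arr.filter (fun v => (PySem.Int.mod v (arr.length : Int)).toNat == i))
          (fun v => v) false)
        = if (PySem.Int.mod a (arr.length : Int)).toNat = i then List.count a arr else 0 := by
    intro i
    rw [(PySem.List.sorted_perm _ _ _).count_eq]
    by_cases hp : (PySem.Int.mod a (arr.length : Int)).toNat = i
    · rw [if_pos hp, List.count_filter (by simpa using hp)]
    · rw [if_neg hp, List.count_eq_zero]
      intro hmem
      exact hp (by simpa using (List.mem_filter.1 hmem).2)
  have hmap : (List.range arr.length).map
        (Function.comp (Function.comp (List.count a)
          (fun b => PySem.List.sorted b (fun v => v) false))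
          (fun i => arr.filter (fun v => (PySem.Int.mod v (arr.length : Int)).toNat == i)))
      = (List.range arr.length).map
        (fun i => if (PySem.Int.mod a (arr.length : Int)).toNat = i then List.count a arr else 0) := by
    refine List.map_congr_left ?_
    intro i _
    exact hstep i
  rw [hmap, sum_map_range_single]
  by_cases hmem : a ∈ arr
  · have hn : (0 : Int) < (arr.length : Int) := by
      have := List.length_pos_of_mem hmem; omega
    have h1 := PySem.Int.mod_nonneg a hn
    have h2 := PySem.Int.mod_lt a hn
    rw [if_pos (by omega)]
  · rw [List.count_eq_zero_of_not_mem hmem]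
    simp

lemma pairwise_lemma (arr : List Int) :
    List.Pairwise (fun a b => pvKey (arr.length : Int) a ≤ pvKey (arr.length : Int) b)
      ((pvBuckets arr).map (fun b => PySem.List.sorted b (fun v => v) false)).flatten := by
  rw [List.pairwise_flatten]
  constructor
  · intro l hl
    rw [List.mem_map] at hl
    obtain ⟨bucket, hb, rfl⟩ := hl
    unfold pvBuckets at hb
    rw [List.mem_map] at hb
    obtain ⟨i, _, rfl⟩ := hb
    refine (PySem.List.sorted_pairwise _ (fun v => v)).imp_of_mem ?_
    intro a b ha hb hab
    rw [PySem.List.mem_sorted] at ha hb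
    obtain ⟨_, hma⟩ := mem_bucket arr i a ha
    obtain ⟨_, hmb⟩ := mem_bucket arr i b hb
    rw [pvKey, pvKey, Prod.Lex.toLex_le_toLex]
    exact Or.inr ⟨by rw [hma, hmb], hab⟩
  · unfold pvBuckets
    rw [List.pairwise_map, List.pairwise_map]
    refine List.pairwise_lt_range.imp_of_mem ?_
    intro i j _ _ hij x hx y hy
    rw [PySem.List.mem_sorted] at hx hy
    obtain ⟨_, hmx⟩ := mem_bucket arr i x hx
    obtain ⟨_, hmy⟩ := mem_bucket arr j y hy
    rw [pvKey, pvKey, Prod.Lex.toLex_le_toLex]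
    refine Or.inl ?_
    show PySem.Int.mod x (arr.length : Int) < PySem.Int.mod y (arr.length : Int)
    rw [hmx, hmy]
    exact_mod_cast hij

-- ===== VERDICT (by name: the statement is the Claim_ definition above) =====
theorem hash_sort_spec : Claim_equal_hash_sort := by
  intro arr _
  unfold Spec_hash_sort
  rw [hash_sort_eq, alt_eq]
  exact PySem.List.eq_of_perm_of_pairwise_le_of_injective
    (pvKey (arr.length : Int)) (pvKey_inj _)
    ((perm_lemma arr).trans (PySem.List.sorted_perm arr _ false).symm)
    (pairwise_lemma arr)
    (PySem.List.sorted_pairwise arr _)
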